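-- pv_equiv track=rewrite | github.com/bro-xuan/world-analogue-photography-museum | scripts/prepare_landing_data.py | _diversify
-- ===== SOURCE A (Python) =====
-- def _diversify(cameras: list[dict], min_gap: int) -> list[dict]:
--     """Reorder cameras so no same-brand cameras appear within min_gap positions."""
--     if not cameras:
--         return []
--
--     result = []
--     remaining = list(cameras)
--
--     while remaining:
--         # Look at recent brands in the result tail
--         recent_brands = set()
--         for entry in result[-min_gap:]:
--             recent_brands.add(entry.get("manufacturer", "").lower())
--
--         # Find first candidate that doesn't clash
--         placed = False
--         for i, cam in enumerate(remaining):
--             brand = cam.get("manufacturer", "").lower()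
--             if brand not in recent_brands:
--                 result.append(remaining.pop(i))
--                 placed = True
--                 break
--
--         if not placed:
--             # No non-clashing candidate; just take the first one
--             result.append(remaining.pop(0))
--
--     return result
-- ===== SOURCE B (Python) =====
-- def _diversify(cameras: list[dict], min_gap: int) -> list[dict]:
--     """Reorder cameras so no same-brand cameras appear within min_gap positions.
--
--     One FIFO queue of (original index, camera) per brand; each round places the
--     earliest-indexed queue front whose brand is not among the brands of the
--     last min_gap placed cameras, falling back to the earliest front overall.
--     """
--     queues = {}
--     for idx, cam in enumerate(cameras):
--         queues.setdefault(cam.get("manufacturer", "").lower(), []).append((idx, cam))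
--     placed_brands = []
--     result = []
--     for _ in range(len(cameras)):
--         blocked = set(placed_brands[-min_gap:])
--         best = None
--         fallback = None
--         for b, q in queues.items():
--             if q:
--                 idx = q[0][0]
--                 if fallback is None or idx < fallback[0]:
--                     fallback = (idx, b)
--                 if b not in blocked and (best is None or idx < best[0]):
--                     best = (idx, b)
--         idx, b = best if best is not None else fallback
--         _, cam = queues[b].pop(0)
--         result.append(cam)
--         placed_brands.append(b)
--     return result
-- ===== Notes on version B (the rewrite author's own statement) =====
-- stated objective: alternative
-- what changed: Instead of rescanning and popping from a shrinking 'remaining' list each round, B builds one FIFO queue of (original index, camera) per brand once and each round places the minimal-index queue front whose brand is not among the brands of the last min_gap placed cameras, falling back to the minimal front overall.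
import Mathlib
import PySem

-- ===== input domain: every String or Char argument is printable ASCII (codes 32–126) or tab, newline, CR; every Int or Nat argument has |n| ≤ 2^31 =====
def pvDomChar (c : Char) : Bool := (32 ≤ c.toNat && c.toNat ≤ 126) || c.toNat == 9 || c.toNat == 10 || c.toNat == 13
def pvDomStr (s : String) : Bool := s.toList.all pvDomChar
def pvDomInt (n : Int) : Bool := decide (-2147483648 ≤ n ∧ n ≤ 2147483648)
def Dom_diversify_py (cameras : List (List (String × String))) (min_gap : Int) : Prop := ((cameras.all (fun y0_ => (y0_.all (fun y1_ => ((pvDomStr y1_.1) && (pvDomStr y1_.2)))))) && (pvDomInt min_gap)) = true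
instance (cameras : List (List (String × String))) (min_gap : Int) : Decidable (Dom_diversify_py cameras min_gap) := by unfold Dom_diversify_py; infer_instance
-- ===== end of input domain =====

-- B reorders via per-brand FIFO queues keyed by original index, blocking the brands of the
-- last min_gap placed cameras (alternative algorithm; same return value as A).

-- ===== PORT A =====
-- cam.get("manufacturer", "").lower()
def pvBrand (cam : List (String × String)) : String :=
  PySem.Str.lower (PySem.Dict.getD (PySem.Dict.mk cam) "manufacturer" "")

-- recent_brands built from result[-min_gap:]
def pvRecent (min_gap : Int) (result : List (List (String × String))) : PySem.Set String :=
  (PySem.List.slice result (some (-min_gap)) none).foldl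
    (fun s e => PySem.Set.add s (pvBrand e)) PySem.Set.empty

-- the 'while remaining:' loop of A
def pvALoop (min_gap : Int) (result remaining : List (List (String × String))) :
    List (List (String × String)) :=
  if remaining.isEmpty then result
  else
    -- first candidate whose brand is not in recent_brands, else index 0
    let i : Nat :=
      ((remaining.findIdx? (fun cam =>
          !(PySem.Set.contains (pvRecent min_gap result) (pvBrand cam)))).getD 0)
    match h2 : PySem.List.pop? remaining (i : Int) with
    | some (cam, rest) => pvALoop min_gap (result ++ [cam]) rest
    | none => result            -- unreachable: the index is always valid
  termination_by remaining.length
  decreasing_by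
    have h3 := PySem.List.length_of_pop?_eq_some remaining h2
    simp at h3
    omega

def diversify_py (cameras : List (List (String × String))) (min_gap : Int) :
    List (List (String × String)) :=
  if cameras.isEmpty then [] else pvALoop min_gap [] cameras

-- ===== PORT B =====
-- queues.setdefault(brand, []).append((idx, cam)) over enumerate(cameras)
def pvBQueues (cameras : List (List (String × String))) :
    PySem.Dict String (List (Int × List (String × String))) :=
  (PySem.List.enumerate cameras).foldl
    (fun d p => d.insert (pvBrand p.2) (d.getD (pvBrand p.2) [] ++ [p]))
    PySem.Dict.empty

-- fallback update: minimal front index overall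
def pvAnyUpd (acc : Option (Int × String))
    (bq : String × List (Int × List (String × String))) : Option (Int × String) :=
  match bq.2 with
  | [] => acc
  | (idx, _) :: _ =>
    match acc with
    | none => some (idx, bq.1)
    | some (i0, _) => if idx < i0 then some (idx, bq.1) else acc

-- best update: minimal front index among brands not in blocked
def pvBestUpd (blocked : PySem.Set String) (acc : Option (Int × String))
    (bq : String × List (Int × List (String × String))) : Option (Int × String) :=
  match bq.2 with
  | [] => acc
  | (idx, _) :: _ =>
    if PySem.Set.contains blocked bq.1 = false then
      match acc with
      | none => some (idx, bq.1)
      | some (i0, _) => if idx < i0 then some (idx, bq.1) else acc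
    else acc

-- one iteration of B's 'for _ in range(len(cameras))' loop (the counter is unused)
def pvBStep (min_gap : Int)
    (st : PySem.Dict String (List (Int × List (String × String))) × List String ×
          List (List (String × String)))
    (_pos : Int) :
    PySem.Dict String (List (Int × List (String × String))) × List String ×
      List (List (String × String)) :=
  let queues := st.1
  let placed := st.2.1
  let result := st.2.2
  let blocked : PySem.Set String :=
    PySem.Set.ofList (PySem.List.slice placed (some (-min_gap)) none)
  let sel := queues.items.foldl
    (fun (acc : Option (Int × String) × Option (Int × String)) bq =>
      (pvBestUpd blocked acc.1 bq, pvAnyUpd acc.2 bq))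
    (none, none)
  match (match sel.1 with | some x => some x | none => sel.2) with
  | none => st                  -- unreachable: some queue is non-empty
  | some (_, b) =>
    match queues.getD b [] with
    | [] => st                  -- unreachable: the chosen queue is non-empty
    | (_, cam) :: qrest =>
      (queues.insert b qrest, placed ++ [b], result ++ [cam])

def diversify_py_alt (cameras : List (List (String × String))) (min_gap : Int) :
    List (List (String × String)) :=
  ((PySem.List.pyRange 0 (cameras.length : Int) 1).foldl (pvBStep min_gap)
    (pvBQueues cameras, [], [])).2.2

-- ===== PRECONDITION & SPEC =====
def Spec_diversify_py (cameras : List (List (String × String))) (min_gap : Int) (out : List (List (String × String))) : Prop := out = diversify_py_alt cameras min_gap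
instance (cameras : List (List (String × String))) (min_gap : Int) (out : List (List (String × String))) : Decidable (Spec_diversify_py cameras min_gap out) := by unfold Spec_diversify_py; infer_instance

-- ===== CLAIM (what is proved, stated in full; the proofs are below) =====
def Claim_equal_diversify_py : Prop := ∀ (cameras : List (List (String × String))) (min_gap : Int), Dom_diversify_py cameras min_gap → Spec_diversify_py cameras min_gap (diversify_py cameras min_gap)

-- ===== LEMMAS AND PROOFS =====

-- the camera-dict type, for lemma statements only
abbrev PvCam := List (String × String)

-- the brands of result[-min_gap:], as a list (what A's recent set contains)
def pvWin (min_gap : Int) (result : List PvCam) : List String :=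
  (PySem.List.slice result (some (-min_gap)) none).map pvBrand

-- running minimum by first component (first wins)
def pvUpd (acc : Option (Int × String)) (x : Int × String) : Option (Int × String) :=
  match acc with
  | none => some x
  | some (i0, _) => if x.1 < i0 then some x else acc

-- the (front index, brand) pairs of the non-empty queues
def pvFronts (items : List (String × List (Int × PvCam))) : List (Int × String) :=
  items.filterMap (fun bq => bq.2.head?.map (fun p => (p.1, bq.1)))

lemma pvSliceMap {α β : Type} (f : α → β) (l : List α) (a : Int) :
    PySem.List.slice (l.map f) (some a) none = (PySem.List.slice l (some a) none).map f := by
  rw [PySem.List.slice_some_none, PySem.List.slice_some_none, List.length_map, List.map_drop]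

lemma pvOfList_contains (l : List String) (x : String) :
    PySem.Set.contains (PySem.Set.ofList l) x = l.contains x := by
  rw [Bool.eq_iff_iff, PySem.Set.contains_iff, PySem.Set.mem_ofList, List.contains_iff_mem]

lemma pvAny_eq_minfold (items : List (String × List (Int × PvCam))) (acc : Option (Int × String)) :
    items.foldl pvAnyUpd acc = (pvFronts items).foldl pvUpd acc := by
  induction items generalizing acc with
  | nil => rfl
  | cons bq tl ih =>
    obtain ⟨b, q⟩ := bq
    cases hq : q with
    | nil =>
      simp only [List.foldl_cons, pvFronts, List.filterMap_cons, hq]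
      simpa [pvFronts, pvAnyUpd] using ih acc
    | cons p q' =>
      simp only [List.foldl_cons, pvFronts, List.filterMap_cons, hq]
      have hstep : pvAnyUpd acc (b, p :: q') = pvUpd acc (p.1, b) := by
        obtain ⟨p1, p2⟩ := p
        cases acc with
        | none => rfl
        | some a => obtain ⟨a1, a2⟩ := a; rfl
      simpa [pvFronts, hstep] using ih (pvUpd acc (p.1, b))

lemma pvBest_eq_minfold (blocked : PySem.Set String)
    (items : List (String × List (Int × PvCam))) (acc : Option (Int × String)) :
    items.foldl (pvBestUpd blocked) acc
      = ((pvFronts items).filter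
          (fun x => decide (PySem.Set.contains blocked x.2 = false))).foldl pvUpd acc := by
  induction items generalizing acc with
  | nil => rfl
  | cons bq tl ih =>
    obtain ⟨b, q⟩ := bq
    cases hq : q with
    | nil =>
      simp only [List.foldl_cons, pvFronts, List.filterMap_cons, hq]
      simpa [pvFronts, pvBestUpd] using ih acc
    | cons p q' =>
      simp only [List.foldl_cons, pvFronts, List.filterMap_cons, hq]
      by_cases hb : PySem.Set.contains blocked b = false
      · have hb' : b ∉ blocked := by simpa using hb
        have hstep : pvBestUpd blocked acc (b, p :: q') = pvUpd acc (p.1, b) := by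
          obtain ⟨p1, p2⟩ := p
          cases acc with
          | none => simp [pvBestUpd, pvUpd, hb']
          | some a => obtain ⟨a1, a2⟩ := a; simp [pvBestUpd, pvUpd, hb']
        rw [hstep]
        simpa [pvFronts, List.filter_cons, hb'] using ih (pvUpd acc (p.1, b))
      · have hb' : b ∈ blocked := by simpa using hb
        have hstep : pvBestUpd blocked acc (b, p :: q') = acc := by
          obtain ⟨p1, p2⟩ := p
          simp [pvBestUpd, hb']
        rw [hstep]
        simpa [pvFronts, List.filter_cons, hb'] using ih acc

lemma pvMinFold_some (l : List (Int × String)) (a : Int × String) :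
    ∃ m, l.foldl pvUpd (some a) = some m ∧ (m = a ∨ m ∈ l) ∧ m.1 ≤ a.1 ∧ ∀ x ∈ l, m.1 ≤ x.1 := by
  induction l generalizing a with
  | nil => exact ⟨a, rfl, Or.inl rfl, le_refl _, by simp⟩
  | cons hd tl ih =>
    obtain ⟨a1, a2⟩ := a
    by_cases hlt : hd.1 < a1
    · have hstep : pvUpd (some (a1, a2)) hd = some hd := by simp [pvUpd, hlt]
      obtain ⟨m, hm, hmem, hle, hall⟩ := ih hd
      refine ⟨m, by simpa [hstep] using hm, ?_, ?_, ?_⟩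
      · rcases hmem with h | h
        · exact Or.inr (by simp [h])
        · exact Or.inr (by simp [h])
      · simp at hle ⊢; omega
      · intro x hx
        rcases List.mem_cons.mp hx with rfl | h
        · exact hle
        · exact hall x h
    · have hstep : pvUpd (some (a1, a2)) hd = some (a1, a2) := by simp [pvUpd, hlt]
      obtain ⟨m, hm, hmem, hle, hall⟩ := ih (a1, a2)
      refine ⟨m, by simpa [hstep] using hm, ?_, hle, ?_⟩
      · rcases hmem with h | h
        · exact Or.inl h
        · exact Or.inr (by simp [h])
      · intro x hx
        rcases List.mem_cons.mp hx with rfl | h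
        · simp at hle ⊢; omega
        · exact hall x h

lemma pvMinFold_unique (l : List (Int × String)) (t : Int × String) (ht : t ∈ l)
    (hmin : ∀ x ∈ l, t.1 ≤ x.1)
    (hinj : ∀ x ∈ l, ∀ y ∈ l, x.1 = y.1 → x = y) : l.foldl pvUpd none = some t := by
  cases l with
  | nil => cases ht
  | cons hd tl =>
    obtain ⟨m, hm, hmem, hle, hall⟩ := pvMinFold_some tl hd
    have hmem' : m ∈ hd :: tl := by
      rcases hmem with h | h
      · simp [h]
      · simp [h]
    have h1 : t.1 ≤ m.1 := hmin m hmem'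
    have h2 : m.1 ≤ t.1 := by
      rcases List.mem_cons.mp ht with rfl | h
      · exact hle
      · exact hall _ h
    have hmt : m = t := hinj m hmem' t ht (le_antisymm h2 h1)
    show tl.foldl pvUpd (pvUpd none hd) = some t
    have : pvUpd none hd = some hd := rfl
    rw [this, hm, hmt]

lemma pvPairwiseInj {rem : List (Int × PvCam)} (hR : rem.Pairwise (fun p q => p.1 < q.1)) :
    ∀ x ∈ rem, ∀ y ∈ rem, x.1 = y.1 → x = y := by
  induction rem with
  | nil => simp
  | cons hd tl ih =>
    obtain ⟨hhd, htl⟩ := List.pairwise_cons.mp hR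
    intro x hx y hy hxy
    rcases List.mem_cons.mp hx with rfl | hx' <;> rcases List.mem_cons.mp hy with rfl | hy'
    · rfl
    · exact absurd hxy (by have := hhd y hy'; omega)
    · exact absurd hxy (by have := hhd x hx'; omega)
    · exact ih htl x hx' y hy' hxy

lemma pvF_mem {queues : PySem.Dict String (List (Int × PvCam))} {rem : List (Int × PvCam)}
    (hQ : ∀ b, queues.getD b [] = rem.filter (fun q => pvBrand q.2 == b))
    (hnd : queues.keys.Nodup) {x : Int × String} (hx : x ∈ pvFronts queues.items) :
    ∃ p ∈ rem, p.1 = x.1 ∧ pvBrand p.2 = x.2 := by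
  obtain ⟨bq, hbq, hfx⟩ := List.mem_filterMap.mp hx
  obtain ⟨b, q⟩ := bq
  cases hq : q with
  | nil => rw [hq] at hfx; simp at hfx
  | cons p0 q' =>
    rw [hq] at hfx
    simp only [List.head?_cons, Option.map_some] at hfx
    have hget : queues.getD b [] = q := PySem.Dict.getD_of_mem_items queues hbq hnd []
    have hfil : q = rem.filter (fun r => pvBrand r.2 == b) := by rw [← hget, hQ]
    have hp0 : p0 ∈ rem.filter (fun r => pvBrand r.2 == b) := by
      rw [← hfil, hq]; exact List.mem_cons_self
    have hmem := List.mem_filter.mp hp0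
    obtain rfl := Option.some.inj hfx
    exact ⟨p0, hmem.1, rfl, by simpa using hmem.2⟩

lemma pvFilter_split {rem : List (Int × PvCam)} {pre suf : List (Int × PvCam)} {p : Int × PvCam}
    (hrem : rem = pre ++ p :: suf) (hpre : ∀ q ∈ pre, pvBrand q.2 ≠ pvBrand p.2) :
    rem.filter (fun q => pvBrand q.2 == pvBrand p.2)
      = p :: suf.filter (fun q => pvBrand q.2 == pvBrand p.2) := by
  subst hrem
  rw [List.filter_append]
  have h1 : pre.filter (fun q => pvBrand q.2 == pvBrand p.2) = [] :=
    List.filter_eq_nil_iff.mpr (fun q hq => by simpa using hpre q hq)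
  rw [h1, List.filter_cons]
  simp

lemma pvF_target {queues : PySem.Dict String (List (Int × PvCam))} {rem : List (Int × PvCam)}
    (hQ : ∀ b, queues.getD b [] = rem.filter (fun q => pvBrand q.2 == b))
    {pre suf : List (Int × PvCam)} {p : Int × PvCam}
    (hrem : rem = pre ++ p :: suf) (hpre : ∀ q ∈ pre, pvBrand q.2 ≠ pvBrand p.2) :
    (p.1, pvBrand p.2) ∈ pvFronts queues.items := by
  have hfil := pvFilter_split hrem hpre
  have hget : queues.getD (pvBrand p.2) []
      = p :: suf.filter (fun q => pvBrand q.2 == pvBrand p.2) := by rw [hQ, hfil]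
  have hne : queues.getD (pvBrand p.2) [] ≠ [] := by rw [hget]; simp
  obtain ⟨v, hv⟩ : ∃ v, queues.get? (pvBrand p.2) = some v := by
    rcases hg : queues.get? (pvBrand p.2) with _ | v
    · exact absurd (by rw [PySem.Dict.getD_eq_get?_getD, hg]; rfl) hne
    · exact ⟨v, rfl⟩
  have hveq : v = p :: suf.filter (fun q => pvBrand q.2 == pvBrand p.2) := by
    rw [← hget, PySem.Dict.getD_eq_get?_getD, hv]; rfl
  have hmem := PySem.Dict.mem_items_of_get?_eq_some queues hv
  exact List.mem_filterMap.mpr ⟨(pvBrand p.2, v), hmem, by rw [hveq]; simp⟩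

lemma pvF_inj {queues : PySem.Dict String (List (Int × PvCam))} {rem : List (Int × PvCam)}
    (hQ : ∀ b, queues.getD b [] = rem.filter (fun q => pvBrand q.2 == b))
    (hnd : queues.keys.Nodup) (hR : rem.Pairwise (fun p q => p.1 < q.1)) :
    ∀ x ∈ pvFronts queues.items, ∀ y ∈ pvFronts queues.items, x.1 = y.1 → x = y := by
  intro x hx y hy hxy
  obtain ⟨p, hp, hp1, hp2⟩ := pvF_mem hQ hnd hx
  obtain ⟨q, hq, hq1, hq2⟩ := pvF_mem hQ hnd hy
  have hpq : p = q := pvPairwiseInj hR p hp q hq (by omega)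
  subst hpq
  obtain ⟨x1, x2⟩ := x
  obtain ⟨y1, y2⟩ := y
  simp_all

lemma pvSel_found {queues : PySem.Dict String (List (Int × PvCam))} {rem : List (Int × PvCam)}
    {blocked : PySem.Set String} {pre suf : List (Int × PvCam)} {p : Int × PvCam}
    (hQ : ∀ b, queues.getD b [] = rem.filter (fun q => pvBrand q.2 == b))
    (hnd : queues.keys.Nodup) (hR : rem.Pairwise (fun p q => p.1 < q.1))
    (hrem : rem = pre ++ p :: suf)
    (hpre : ∀ q ∈ pre, PySem.Set.contains blocked (pvBrand q.2) = true)
    (hp : PySem.Set.contains blocked (pvBrand p.2) = false) :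
    queues.items.foldl (pvBestUpd blocked) none = some (p.1, pvBrand p.2) := by
  have hpreb : ∀ q ∈ pre, pvBrand q.2 ≠ pvBrand p.2 := by
    intro q hq h
    have hq1 := hpre q hq
    rw [h, hp] at hq1
    exact absurd hq1 (by simp)
  have htF := pvF_target hQ hrem hpreb
  rw [pvBest_eq_minfold]
  have hsuf : ∀ q ∈ suf, p.1 < q.1 := by
    have := hrem ▸ hR
    have h2 := (List.pairwise_append.mp this).2.1
    exact (List.pairwise_cons.mp h2).1
  apply pvMinFold_unique
  · exact List.mem_filter.mpr ⟨htF, by simpa using hp⟩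
  · intro x hxf
    obtain ⟨hxF, hxfree⟩ := List.mem_filter.mp hxf
    obtain ⟨q, hqrem, hq1, hq2⟩ := pvF_mem hQ hnd hxF
    have hqfree : PySem.Set.contains blocked (pvBrand q.2) = false := by
      rw [hq2]; exact of_decide_eq_true hxfree
    have hqs : q = p ∨ q ∈ suf := by
      have : q ∈ pre ∨ q = p ∨ q ∈ suf := by
        rw [hrem] at hqrem; simpa using hqrem
      rcases this with h | h
      · rw [hpre q h] at hqfree; exact absurd hqfree (by simp)
      · exact h
    have hle : p.1 ≤ q.1 := by
      rcases hqs with rfl | h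
      · exact le_refl _
      · exact le_of_lt (hsuf q h)
    simpa [← hq1] using hle
  · intro x hx y hy
    exact pvF_inj hQ hnd hR x (List.mem_of_mem_filter hx) y (List.mem_of_mem_filter hy)

lemma pvSel_none {queues : PySem.Dict String (List (Int × PvCam))} {rem : List (Int × PvCam)}
    {blocked : PySem.Set String} {suf : List (Int × PvCam)} {p : Int × PvCam}
    (hQ : ∀ b, queues.getD b [] = rem.filter (fun q => pvBrand q.2 == b))
    (hnd : queues.keys.Nodup) (hR : rem.Pairwise (fun p q => p.1 < q.1))
    (hrem : rem = p :: suf)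
    (hall : ∀ q ∈ rem, PySem.Set.contains blocked (pvBrand q.2) = true) :
    queues.items.foldl (pvBestUpd blocked) none = none
    ∧ queues.items.foldl pvAnyUpd none = some (p.1, pvBrand p.2) := by
  constructor
  · rw [pvBest_eq_minfold]
    have hnil : (pvFronts queues.items).filter
        (fun x => decide (PySem.Set.contains blocked x.2 = false)) = [] := by
      apply List.filter_eq_nil_iff.mpr
      intro x hx
      obtain ⟨q, hqrem, hq1, hq2⟩ := pvF_mem hQ hnd hx
      have h1 : pvBrand q.2 ∈ blocked := by simpa using hall q hqrem
      rw [← hq2]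
      simpa using h1
    rw [hnil]
    rfl
  · rw [pvAny_eq_minfold]
    have htF := pvF_target hQ (pre := []) (by simpa using hrem) (by simp)
    apply pvMinFold_unique _ _ htF
    · intro x hx
      obtain ⟨q, hqrem, hq1, hq2⟩ := pvF_mem hQ hnd hx
      have : p.1 ≤ q.1 := by
        rw [hrem] at hqrem
        rcases List.mem_cons.mp hqrem with rfl | h
        · exact le_refl _
        · exact le_of_lt ((List.pairwise_cons.mp (hrem ▸ hR)).1 q h)
      omega
    · exact pvF_inj hQ hnd hR

lemma pvBStep_eq {min_gap : Int} {queues : PySem.Dict String (List (Int × PvCam))}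
    {placed : List String} {result : List PvCam}
    {rem pre suf : List (Int × PvCam)} {p : Int × PvCam} {pos : Int}
    (hQ : ∀ b, queues.getD b [] = rem.filter (fun q => pvBrand q.2 == b))
    (hrem : rem = pre ++ p :: suf)
    (hpreb : ∀ q ∈ pre, pvBrand q.2 ≠ pvBrand p.2)
    (hchoice :
      queues.items.foldl
          (pvBestUpd (PySem.Set.ofList (PySem.List.slice placed (some (-min_gap)) none))) none
        = some (p.1, pvBrand p.2)
      ∨ (queues.items.foldl
            (pvBestUpd (PySem.Set.ofList (PySem.List.slice placed (some (-min_gap)) none))) none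
          = none
         ∧ queues.items.foldl pvAnyUpd none = some (p.1, pvBrand p.2))) :
    pvBStep min_gap (queues, placed, result) pos =
      (queues.insert (pvBrand p.2) (suf.filter (fun q => pvBrand q.2 == pvBrand p.2)),
       placed ++ [pvBrand p.2],
       result ++ [p.2]) := by
  have hfil := pvFilter_split hrem hpreb
  have hget : queues.getD (pvBrand p.2) []
      = p :: suf.filter (fun q => pvBrand q.2 == pvBrand p.2) := by rw [hQ, hfil]
  simp only [pvBStep]
  rw [PySem.List.foldl_prod_mk
    (f := pvBestUpd (PySem.Set.ofList (PySem.List.slice placed (some (-min_gap)) none)))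
    (g := pvAnyUpd)]
  have hsel : (match (queues.items.foldl
      (pvBestUpd (PySem.Set.ofList (PySem.List.slice placed (some (-min_gap)) none))) none,
      queues.items.foldl pvAnyUpd none).1 with
    | some x => some x
    | none => (queues.items.foldl
        (pvBestUpd (PySem.Set.ofList (PySem.List.slice placed (some (-min_gap)) none))) none,
        queues.items.foldl pvAnyUpd none).2) = some (p.1, pvBrand p.2) := by
    rcases hchoice with hbest | ⟨hbest, hany⟩
    · simp only [hbest]
    · simp only [hbest, hany]
  rw [hsel]
  simp only [hget]

lemma pvRecent_contains (min_gap : Int) (result : List PvCam) (x : String) :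
    PySem.Set.contains (pvRecent min_gap result) x = (pvWin min_gap result).contains x := by
  unfold pvRecent pvWin
  rw [Bool.eq_iff_iff, PySem.Set.contains_iff, List.contains_iff_mem,
    PySem.Set.mem_foldl_add]
  simp [eq_comm]

lemma pvALoop_step (min_gap : Int) (result : List PvCam) (remA : List PvCam) (j : Nat)
    (hj : j < remA.length)
    (hfind : ((remA.findIdx? (fun cam =>
        !(PySem.Set.contains (pvRecent min_gap result) (pvBrand cam)))).getD 0) = j) :
    pvALoop min_gap result remA
      = pvALoop min_gap (result ++ [remA[j]]) (remA.eraseIdx j) := by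
  obtain ⟨c, cs, rfl⟩ : ∃ c cs, remA = c :: cs := by
    cases remA with
    | nil => simp at hj
    | cons c cs => exact ⟨c, cs, rfl⟩
  conv_lhs => rw [pvALoop.eq_def]
  rw [if_neg (by simp)]
  simp only [hfind]
  split
  · next cam rest h2 =>
    rw [hfind, PySem.List.pop?_natCast _ j hj] at h2
    obtain ⟨rfl, rfl⟩ : cam = (c :: cs)[j] ∧ rest = (c :: cs).eraseIdx j := by
      have h4 := Option.some.inj h2
      exact ⟨(congrArg Prod.fst h4).symm, (congrArg Prod.snd h4).symm⟩
    rfl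
  · next h2 =>
    rw [hfind, PySem.List.pop?_natCast _ j hj] at h2
    cases h2

lemma pvQFold_getD (l : List (Int × PvCam)) (d : PySem.Dict String (List (Int × PvCam)))
    (b : String) :
    (l.foldl (fun d p => d.insert (pvBrand p.2) (d.getD (pvBrand p.2) [] ++ [p])) d).getD b []
      = d.getD b [] ++ l.filter (fun q => pvBrand q.2 == b) := by
  induction l generalizing d with
  | nil => simp
  | cons p tl ih =>
    rw [List.foldl_cons, ih]
    by_cases hb : pvBrand p.2 = b
    · subst hb
      rw [PySem.Dict.getD_insert_self]
      simp [List.filter_cons]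
    · rw [PySem.Dict.getD_insert_of_ne _ _ _ (fun h => hb (Eq.symm h))]
      simp [List.filter_cons, hb]

lemma pvBQueues_getD (cameras : List PvCam) (b : String) :
    (pvBQueues cameras).getD b []
      = (PySem.List.enumerate cameras).filter (fun q => pvBrand q.2 == b) := by
  unfold pvBQueues
  rw [pvQFold_getD]
  simp

lemma pvBQueues_nodup (cameras : List PvCam) : (pvBQueues cameras).keys.Nodup := by
  unfold pvBQueues
  exact PySem.Dict.nodup_keys_foldl_insert_key _ _ _ _ (by simp [PySem.Dict.keys_empty])

lemma pvMain (min_gap : Int) : ∀ (fuel : Nat) (poss : List Int) (rem : List (Int × PvCam))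
    (queues : PySem.Dict String (List (Int × PvCam))) (placed : List String)
    (result : List PvCam),
    poss.length = fuel →
    rem.length = fuel →
    (∀ b, queues.getD b [] = rem.filter (fun q => pvBrand q.2 == b)) →
    queues.keys.Nodup →
    rem.Pairwise (fun p q => p.1 < q.1) →
    placed = result.map pvBrand →
    (poss.foldl (pvBStep min_gap) (queues, placed, result)).2.2
      = pvALoop min_gap result (rem.map (fun q => q.2)) := by
  intro fuel
  induction fuel with
  | zero =>
    intro poss rem queues placed result hplen hlen hQ hnd hR hP
    obtain rfl : poss = [] := List.length_eq_zero_iff.mp hplen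
    obtain rfl : rem = [] := List.length_eq_zero_iff.mp hlen
    rw [List.foldl_nil, pvALoop.eq_def]
    simp
  | succ f ih =>
    intro poss rem queues placed result hplen hlen hQ hnd hR hP
    obtain ⟨p0, ps, rfl⟩ : ∃ p0 ps, poss = p0 :: ps := by
      cases poss with
      | nil => simp at hplen
      | cons a b => exact ⟨a, b, rfl⟩
    obtain ⟨r0, rs, rfl⟩ : ∃ r0 rs, rem = r0 :: rs := by
      cases rem with
      | nil => simp at hlen
      | cons a b => exact ⟨a, b, rfl⟩
    have hblock : ∀ s : String,
        PySem.Set.contains (PySem.Set.ofList (PySem.List.slice placed (some (-min_gap)) none)) s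
          = PySem.Set.contains (pvRecent min_gap result) s := by
      intro s
      rw [hP, pvSliceMap, pvOfList_contains, pvRecent_contains, pvWin]
    cases hj : ((r0 :: rs).map (fun q => q.2)).findIdx? (fun cam =>
        !(PySem.Set.contains (pvRecent min_gap result) (pvBrand cam))) with
    | some j =>
      obtain ⟨hjlen, hpj, hbefore⟩ := List.findIdx?_eq_some_iff_getElem.mp hj
      have hjlen' : j < (r0 :: rs).length := by simpa using hjlen
      have hdecomp : (r0 :: rs) = (r0 :: rs).take j ++ (r0 :: rs)[j] :: (r0 :: rs).drop (j+1) := by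
        rw [← List.drop_eq_getElem_cons hjlen', List.take_append_drop]
      have hA := pvALoop_step min_gap result _ j hjlen (by rw [hj]; rfl)
      have hpfree : PySem.Set.contains
          (PySem.Set.ofList (PySem.List.slice placed (some (-min_gap)) none))
          (pvBrand ((r0 :: rs)[j]).2) = false := by
        rw [hblock]
        simp only [List.getElem_map] at hpj
        simpa using hpj
      have hpreblk : ∀ q ∈ (r0 :: rs).take j,
          PySem.Set.contains (PySem.Set.ofList (PySem.List.slice placed (some (-min_gap)) none))
            (pvBrand q.2) = true := by
        intro q hq
        obtain ⟨k, hk, hkq⟩ := List.mem_iff_getElem.mp hq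
        have hkj : k < j := by
          simp only [List.length_take] at hk
          omega
        have hkl : k < (r0 :: rs).length := by omega
        have hkq' : (r0 :: rs)[k] = q := by
          rw [← hkq, List.getElem_take]
        have hfalse := hbefore k hkj
        simp only [List.getElem_map] at hfalse
        rw [hkq'] at hfalse
        rw [hblock]
        simpa using hfalse
      have hpreb : ∀ q ∈ (r0 :: rs).take j, pvBrand q.2 ≠ pvBrand ((r0 :: rs)[j]).2 := by
        intro q hq h
        have := hpreblk q hq
        rw [h, hpfree] at this
        exact absurd this (by simp)
      have hB := pvBStep_eq (min_gap := min_gap) (placed := placed) (result := result)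
        (pos := p0) hQ hdecomp hpreb
        (Or.inl (pvSel_found hQ hnd hR hdecomp hpreblk hpfree))
      rw [List.foldl_cons, hB]
      have hQ' : ∀ b, ((queues.insert (pvBrand ((r0 :: rs)[j]).2)
          (((r0 :: rs).drop (j+1)).filter (fun q => pvBrand q.2 == pvBrand ((r0 :: rs)[j]).2))).getD b [])
          = ((r0 :: rs).take j ++ (r0 :: rs).drop (j+1)).filter (fun q => pvBrand q.2 == b) := by
        intro b
        by_cases hb : b = pvBrand ((r0 :: rs)[j]).2
        · rw [hb, PySem.Dict.getD_insert_self, List.filter_append]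
          have hpre0 : ((r0 :: rs).take j).filter
              (fun q => pvBrand q.2 == pvBrand ((r0 :: rs)[j]).2) = [] :=
            List.filter_eq_nil_iff.mpr (fun q hq => by simpa using hpreb q hq)
          rw [hpre0, List.nil_append]
        · rw [PySem.Dict.getD_insert_of_ne _ _ _ (fun h => hb h), hQ b]
          conv_lhs => rw [hdecomp]
          rw [List.filter_append, List.filter_append, List.filter_cons]
          rw [if_neg (by simpa using fun h => hb (Eq.symm h))]
      have hR' : ((r0 :: rs).take j ++ (r0 :: rs).drop (j+1)).Pairwise (fun p q => p.1 < q.1) := by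
        apply List.Pairwise.sublist _ (hdecomp ▸ hR)
        exact List.Sublist.append_left (List.sublist_cons_self _ _) _
      have hlen' : ((r0 :: rs).take j ++ (r0 :: rs).drop (j+1)).length = f := by
        rw [List.length_append, List.length_take, List.length_drop]
        simp only [List.length_cons] at hjlen' hlen ⊢
        omega
      have hP' : placed ++ [pvBrand ((r0 :: rs)[j]).2]
          = (result ++ [((r0 :: rs)[j]).2]).map pvBrand := by
        rw [hP, List.map_append]
        rfl
      have hmain := ih ps ((r0 :: rs).take j ++ (r0 :: rs).drop (j+1))
        (queues.insert (pvBrand ((r0 :: rs)[j]).2)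
          (((r0 :: rs).drop (j+1)).filter (fun q => pvBrand q.2 == pvBrand ((r0 :: rs)[j]).2)))
        (placed ++ [pvBrand ((r0 :: rs)[j]).2])
        (result ++ [((r0 :: rs)[j]).2])
        (by simpa using hplen) hlen' hQ' (PySem.Dict.nodup_keys_insert _ _ _ hnd) hR' hP'
      rw [hA]
      simp only [List.getElem_map]
      rw [List.eraseIdx_eq_take_drop_succ, ← List.map_take, ← List.map_drop, ← List.map_append]
      exact hmain
    | none =>
      have hall' := List.findIdx?_eq_none_iff.mp hj
      have hA := pvALoop_step min_gap result ((r0 :: rs).map (fun q => q.2)) 0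
        (by simp only [List.length_map, List.length_cons]; omega) (by rw [hj]; rfl)
      have hall : ∀ q ∈ (r0 :: rs),
          PySem.Set.contains (PySem.Set.ofList (PySem.List.slice placed (some (-min_gap)) none))
            (pvBrand q.2) = true := by
        intro q hq
        have hfalse := hall' q.2 (List.mem_map_of_mem hq)
        rw [hblock]
        simpa using hfalse
      have hB := pvBStep_eq (min_gap := min_gap) (placed := placed) (result := result)
        (pos := p0) hQ
        (show (r0 :: rs) = [] ++ r0 :: rs from rfl) (by intro q hq; simp at hq)
        (Or.inr (pvSel_none hQ hnd hR rfl hall))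
      rw [List.foldl_cons, hB]
      have hQ' : ∀ b, ((queues.insert (pvBrand r0.2)
          (rs.filter (fun q => pvBrand q.2 == pvBrand r0.2))).getD b [])
          = rs.filter (fun q => pvBrand q.2 == b) := by
        intro b
        by_cases hb : b = pvBrand r0.2
        · subst hb
          rw [PySem.Dict.getD_insert_self]
        · rw [PySem.Dict.getD_insert_of_ne _ _ _ (fun h => hb h), hQ b]
          rw [List.filter_cons, if_neg (by simpa using fun h => hb (Eq.symm h))]
      have hP' : placed ++ [pvBrand r0.2] = (result ++ [r0.2]).map pvBrand := by
        rw [hP, List.map_append]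
        rfl
      have hmain := ih ps rs
        (queues.insert (pvBrand r0.2) (rs.filter (fun q => pvBrand q.2 == pvBrand r0.2)))
        (placed ++ [pvBrand r0.2])
        (result ++ [r0.2])
        (by simpa using hplen) (by simpa using hlen) hQ'
        (PySem.Dict.nodup_keys_insert _ _ _ hnd)
        (List.Pairwise.sublist (List.sublist_cons_self _ _) hR) hP'
      rw [hA]
      simp only [List.map_cons, List.getElem_cons_zero, List.eraseIdx_zero, List.tail_cons]
      exact hmain

lemma pv_eq (cameras : List PvCam) (min_gap : Int) :
    diversify_py cameras min_gap = diversify_py_alt cameras min_gap := by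
  unfold diversify_py diversify_py_alt
  by_cases hc : cameras.isEmpty
  · rw [if_pos hc]
    obtain rfl : cameras = [] := List.isEmpty_iff.mp hc
    rw [show ((([] : List PvCam).length : Nat) : Int) = ((0 : Nat) : Int) from rfl,
      PySem.List.pyRange_zero_natCast]
    simp
  · rw [if_neg hc]
    have hmain := pvMain min_gap cameras.length
      (PySem.List.pyRange 0 (cameras.length : Int) 1)
      (PySem.List.enumerate cameras)
      (pvBQueues cameras) [] []
      (by rw [PySem.List.pyRange_zero_natCast]; simp)
      (by simp [PySem.List.length_enumerate])
      (fun b => pvBQueues_getD cameras b)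
      (pvBQueues_nodup cameras)
      (PySem.List.pairwise_lt_enumerate cameras 0)
      (by simp)
    rw [PySem.List.map_snd_enumerate] at hmain
    exact hmain.symm

-- ===== VERDICT (by name: the statement is the Claim_ definition above) =====
theorem diversify_py_spec : Claim_equal_diversify_py := by
  intro cameras min_gap _
  unfold Spec_diversify_py
  exact pv_eq cameras min_gap
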